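-- pv_equiv track=rewrite | github.com/Joshikarank/training_basic_problems | String_problems.py | charf
-- ===== SOURCE A (Python) =====
-- def charf(string1):
--     dict1={}
--     for i in string1:
--         if i not in dict1:
--             dict1[i]=1
--         else:
--             dict1[i]+=1
--             return(dict1)
-- ===== SOURCE B (Python) =====
-- def charf(string1):
--     # Different algorithm: for each distinct character, locate its second
--     # occurrence with str.find; the earliest such position is the first
--     # duplicate.  Build the result dict from the prefix before it.
--     best = None
--     for ch in set(string1):
--         second = string1.find(ch, string1.index(ch) + 1)
--         if second != -1 and (best is None or second < best):
--             best = second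
--     if best is None:
--         return None
--     d = dict.fromkeys(string1[:best], 1)
--     d[string1[best]] = 2
--     return d
-- ===== Notes on version B (the rewrite author's own statement) =====
-- stated objective: alternative
-- what changed: Instead of A's single left-to-right scan that grows a count dict and stops at the first repeat, B computes for every distinct character the index of its second occurrence via str.find, takes the minimum of those indices, and then builds the result dict in one shot from the prefix before that position with dict.fromkeys.
import Mathlib
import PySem

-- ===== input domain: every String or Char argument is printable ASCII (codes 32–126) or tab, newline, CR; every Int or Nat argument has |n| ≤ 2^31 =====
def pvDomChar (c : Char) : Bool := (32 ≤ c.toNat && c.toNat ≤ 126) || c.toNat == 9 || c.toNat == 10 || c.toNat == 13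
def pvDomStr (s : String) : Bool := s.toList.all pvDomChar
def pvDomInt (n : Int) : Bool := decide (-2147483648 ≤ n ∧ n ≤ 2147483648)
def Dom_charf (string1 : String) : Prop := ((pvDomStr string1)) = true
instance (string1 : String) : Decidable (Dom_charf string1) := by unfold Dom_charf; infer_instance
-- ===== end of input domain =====

-- B replaces A's single stop-at-first-repeat counting scan by a staged algorithm:
-- the second-occurrence index of every distinct character is located with str.find,
-- their minimum is the first duplicate position, and the result dict is built in one
-- shot from the prefix before it (objective: alternative; same asymptotic cost).

-- ===== PORT A =====
-- A's loop: grow dict1 (every value 1); on the first repeat bump that value and return the dict.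
def charfA_loop : List Char → PySem.Dict String Int → Option (List (String × Int))
  | [], _ => none
  | c :: rest, d =>
      let k := String.singleton c
      if d.contains k = false then
        charfA_loop rest (d.insert k 1)
      else
        some ((d.insert k (d.getD k 0 + 1)).items)

def charf (string1 : String) : Option (List (String × Int)) :=
  charfA_loop string1.toList PySem.Dict.empty

-- ===== PORT B =====
-- B's loop over set(string1): keep the minimum second-occurrence index found so far.
-- (string1.index(ch) is ported as Chars.find: ch is a character of string1, so
-- .index never raises and equals .find.)
def charfB_best : List Char → List Char → Option Int → Option Int
  | [], _, best => best
  | c :: rest, cs, best =>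
      let second := PySem.Chars.findFrom cs [c] (PySem.Chars.find cs [c] + 1) none
      let take : Bool := second != -1 &&
        (match best with | none => true | some b => decide (second < b))
      charfB_best rest cs (if take then some second else best)

def charf_alt (string1 : String) : Option (List (String × Int)) :=
  match charfB_best (PySem.Set.ofList string1.toList) string1.toList none with
  | none => none
  | some best =>
      match PySem.List.pyGet? string1.toList best with
      | none => none   -- unreachable: best is always a valid index into string1
      | some c =>
          some (((PySem.Dict.ofList ((PySem.List.slice string1.toList none (some best)).map
                      (fun x => (String.singleton x, (1 : Int))))).insert
                  (String.singleton c) 2).items)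

-- ===== PRECONDITION & SPEC =====
def Spec_charf (string1 : String) (out : Option (List (String × Int))) : Prop := out = charf_alt string1
instance (string1 : String) (out : Option (List (String × Int))) : Decidable (Spec_charf string1 out) := by unfold Spec_charf; infer_instance

-- ===== CLAIM (what is proved, stated in full; the proofs are below) =====
def Claim_equal_charf : Prop := ∀ (string1 : String), Dom_charf string1 → Spec_charf string1 (charf string1)

-- ===== LEMMAS AND PROOFS =====

-- the dict both programs return at a repeat: seen chars once, the repeated char twice
def render (seen : List Char) (c : Char) : List (String × Int) :=
  ((PySem.Dict.ofList (seen.map (fun x => (String.singleton x, (1 : Int))))).insert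
    (String.singleton c) 2).items

-- the seen-prefix scan both sides are reduced to
def scanRender : List Char → List Char → Option (List (String × Int))
  | [], _ => none
  | c :: rest, seen => if seen.contains c then some (render seen c) else scanRender rest (seen ++ [c])

-- j is a duplicate position of cs
def DupAt (cs : List Char) (j : Nat) : Prop := ∃ c, cs[j]? = some c ∧ c ∈ cs.take j

theorem singleton_inj {a b : Char} (h : String.singleton a = String.singleton b) : a = b := by
  have := congrArg String.toList h
  simpa [String.singleton] using this

theorem singleton_prefix_iff (c : Char) (l : List Char) : [c] <+: l ↔ l.head? = some c := by
  cases l with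
  | nil => simp
  | cons x t => simp [List.cons_prefix_cons, eq_comm]

theorem prefix_drop_iff (c : Char) (l : List Char) (i : Nat) :
    [c] <+: l.drop i ↔ l[i]? = some c := by
  rw [singleton_prefix_iff, List.head?_drop]

-- the dict that B builds from a duplicate-free prefix
theorem items_fromSeen (seen : List Char) (hnd : (seen.map String.singleton).Nodup) :
    (PySem.Dict.ofList (seen.map (fun x => (String.singleton x, (1 : Int))))).items
      = seen.map (fun x => (String.singleton x, (1 : Int))) := by
  have h := PySem.Dict.items_foldl_insert_fresh (ν := Int) seen String.singleton
      (fun _ => (1 : Int)) PySem.Dict.empty (by intro a _; simp) hnd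
  have he : (PySem.Dict.empty : PySem.Dict String Int).items = [] := rfl
  rw [PySem.Dict.ofList, PySem.Dict.update, List.foldl_map]
  rw [h, he, List.nil_append]

theorem keys_of_items {d : PySem.Dict String Int} {seen : List Char}
    (hit : d.items = seen.map (fun x => (String.singleton x, (1 : Int)))) :
    d.keys = seen.map String.singleton := by
  simp [PySem.Dict.keys, hit, Function.comp]

-- A's loop equals the seen-prefix scan
theorem loop_inv (cs : List Char) : ∀ (seen : List Char) (d : PySem.Dict String Int),
    (seen.map String.singleton).Nodup →
    d.items = seen.map (fun x => (String.singleton x, (1 : Int))) →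
    charfA_loop cs d = scanRender cs seen := by
  induction cs with
  | nil => intro seen d _ _; rfl
  | cons c rest ih =>
    intro seen d hnd hit
    have hkeys : d.keys = seen.map String.singleton := keys_of_items hit
    have hmem : (String.singleton c ∈ d.keys) ↔ c ∈ seen := by
      rw [hkeys]
      constructor
      · intro h
        rcases List.mem_map.mp h with ⟨x, hx, he⟩
        exact (singleton_inj he) ▸ hx
      · intro h; exact List.mem_map.mpr ⟨c, h, rfl⟩
    have hcont : d.contains (String.singleton c) = decide (c ∈ seen) := by
      rw [PySem.Dict.contains_eq_decide_mem_keys]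
      exact decide_eq_decide.mpr hmem
    by_cases h : c ∈ seen
    · -- repeat found: both return the dict with c's value 2
      have hmi : (String.singleton c, (1 : Int)) ∈ d.items := by
        rw [hit]; exact List.mem_map.mpr ⟨c, h, rfl⟩
      have hget : d.getD (String.singleton c) 0 = 1 :=
        PySem.Dict.getD_of_mem_items d hmi (hkeys ▸ hnd) 0
      have hd : d = PySem.Dict.ofList (seen.map (fun x => (String.singleton x, (1 : Int)))) := by
        apply PySem.Dict.ext
        rw [hit, items_fromSeen seen hnd]
      simp [charfA_loop, scanRender, render, hcont, h, hget, ← hd]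
    · -- fresh character: A inserts into the dict, B appends to seen
      have hnd' : ((seen ++ [c]).map String.singleton).Nodup := by
        simp [List.nodup_append, hnd]
        intro x hx he
        exact h ((singleton_inj he) ▸ hx)
      have hit' : (d.insert (String.singleton c) 1).items
          = (seen ++ [c]).map (fun x => (String.singleton x, (1 : Int))) := by
        rw [PySem.Dict.items_insert_of_not_contains]
        · simp [hit]
        · simpa [h] using hcont
      simp only [charfA_loop, scanRender, hcont, h, decide_false, Bool.false_eq_true,
        if_true, List.contains_eq_mem, if_false]
      simpa [h] using ih (seen ++ [c]) (d.insert (String.singleton c) 1) hnd' hit'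

-- the seen-prefix scan characterised by the least duplicate position
theorem scan_spec : ∀ (rest seen : List Char), seen.Nodup →
    ((∀ j, ¬ DupAt (seen ++ rest) (seen.length + j)) → scanRender rest seen = none)
    ∧ (∀ j, DupAt (seen ++ rest) (seen.length + j) →
        (∀ i, i < j → ¬ DupAt (seen ++ rest) (seen.length + i)) →
        ∀ c, (seen ++ rest)[seen.length + j]? = some c →
        scanRender rest seen = some (render ((seen ++ rest).take (seen.length + j)) c)) := by
  intro rest
  induction rest with
  | nil =>
    intro seen hnd
    refine ⟨fun _ => rfl, fun j hdup _ c hc => ?_⟩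
    exfalso
    rcases hdup with ⟨c', hget, _⟩
    have := List.getElem?_eq_some_iff.mp hget
    simp at this
  | cons c rest' ih =>
    intro seen hnd
    have hget0 : (seen ++ c :: rest')[seen.length]? = some c := by
      rw [List.getElem?_append_right (Nat.le_refl _)]
      simp
    have htake0 : (seen ++ c :: rest').take seen.length = seen := by
      simp
    by_cases h : c ∈ seen
    · have hdup0 : DupAt (seen ++ c :: rest') (seen.length + 0) :=
        ⟨c, by rw [Nat.add_zero]; exact hget0, by rw [Nat.add_zero, htake0]; exact h⟩
      have hrun : scanRender (c :: rest') seen = some (render seen c) := by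
        simp [scanRender, h]
      refine ⟨fun hall => absurd hdup0 (hall 0), fun j hdupj hmin c0 hc0 => ?_⟩
      cases j with
      | zero =>
        have hc0' : c0 = c := by
          rw [show seen.length + 0 = seen.length by omega, hget0] at hc0
          exact (Option.some.injEq _ _).mp hc0.symm
        rw [hrun, show seen.length + 0 = seen.length by omega, htake0, hc0']
      | succ j' => exact absurd hdup0 (hmin 0 (by omega))
    · have hnd' : (seen ++ [c]).Nodup := by
        simp [List.nodup_append, hnd]
        exact fun a ha hac => h (hac ▸ ha)
      have hE : (seen ++ [c]) ++ rest' = seen ++ c :: rest' := by simp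
      have hrun : scanRender (c :: rest') seen = scanRender rest' (seen ++ [c]) := by
        simp [scanRender, h]
      have ihs := ih (seen ++ [c]) hnd'
      rw [hE] at ihs
      have hlen : (seen ++ [c]).length = seen.length + 1 := by simp
      have hnd0 : ¬ DupAt (seen ++ c :: rest') (seen.length + 0) := by
        rintro ⟨c', hget, hmem⟩
        rw [show seen.length + 0 = seen.length by omega] at hget hmem
        rw [hget0] at hget
        rw [htake0] at hmem
        cases hget
        exact h hmem
      constructor
      · intro hall
        rw [hrun]
        apply ihs.1
        intro j
        rw [hlen, show seen.length + 1 + j = seen.length + (j + 1) by omega]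
        exact hall (j + 1)
      · intro j hdupj hmin c0 hc0
        cases j with
        | zero => exact absurd hdupj hnd0
        | succ j' =>
          rw [hrun]
          have := ihs.2 j'
            (by rw [hlen, show seen.length + 1 + j' = seen.length + (j' + 1) by omega]; exact hdupj)
            (by intro i hi
                rw [hlen, show seen.length + 1 + i = seen.length + (i + 1) by omega]
                exact hmin (i + 1) (by omega))
            c0
            (by rw [hlen, show seen.length + 1 + j' = seen.length + (j' + 1) by omega]; exact hc0)
          rw [this, hlen, show seen.length + 1 + j' = seen.length + (j' + 1) by omega]

theorem mem_take_of_getElem? (l : List Char) (i j : Nat) (c : Char)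
    (h : l[i]? = some c) (hij : i < j) : c ∈ l.take j := by
  apply List.mem_of_getElem? (i := i)
  rw [List.getElem?_take_of_lt hij]
  exact h

theorem getElem?_of_mem_take (l : List Char) (j : Nat) (c : Char) (h : c ∈ l.take j) :
    ∃ i : Nat, i < j ∧ l[i]? = some c := by
  rcases List.mem_iff_getElem.mp h with ⟨i, hi, he⟩
  have hlt : i < j := lt_of_lt_of_le hi (by simp)
  refine ⟨i, hlt, ?_⟩
  rw [← List.getElem?_take_of_lt hlt, List.getElem?_eq_getElem hi, he]

def secondOcc (cs : List Char) (c : Char) : Int :=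
  PySem.Chars.findFrom cs [c] (PySem.Chars.find cs [c] + 1) none

-- a successful secondOcc points at a duplicate position
theorem secondOcc_dup (cs : List Char) (c : Char) (hc : c ∈ cs) (m : Int)
    (hm : secondOcc cs c = m) (hne : m ≠ -1) : 0 < m ∧ DupAt cs m.toNat := by
  have hin : [c] <:+: cs := (List.singleton_infix_iff c cs).mpr hc
  have hf0 : 0 ≤ PySem.Chars.find cs [c] := (PySem.Chars.find_nonneg_iff cs [c]).mpr hin
  set f := PySem.Chars.find cs [c] with hf
  obtain ⟨hpre, _⟩ := PySem.Chars.find_spec hf0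
  have hgf : cs[f.toNat]? = some c := (prefix_drop_iff c cs f.toNat).mp hpre
  have hflen : f.toNat < cs.length := (List.getElem?_eq_some_iff.mp hgf).1
  have hcast : f + 1 = ((f.toNat + 1 : Nat) : Int) := by omega
  have hle : f.toNat + 1 ≤ cs.length := hflen
  rw [secondOcc, ← hf, hcast] at hm
  have hne' : PySem.Chars.findFrom cs [c] ((f.toNat + 1 : Nat) : Int) ≠ -1 := by
    rw [hm]; exact hne
  obtain ⟨hkm, hprem, _⟩ := PySem.Chars.findFrom_natCast_spec cs [c] (f.toNat + 1) hle hne'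
  rw [hm] at hkm hprem
  have hpos : 0 < m := by omega
  refine ⟨hpos, c, (prefix_drop_iff c cs m.toNat).mp hprem, ?_⟩
  exact mem_take_of_getElem? cs f.toNat m.toNat c hgf (by omega)

-- every duplicate position is bounded below by its character's secondOcc
theorem dup_secondOcc (cs : List Char) (j : Nat) (c : Char)
    (hj : cs[j]? = some c) (hmem : c ∈ cs.take j) :
    secondOcc cs c ≠ -1 ∧ secondOcc cs c ≤ (j : Int) := by
  have hc : c ∈ cs := List.mem_of_mem_take hmem
  have hin : [c] <:+: cs := (List.singleton_infix_iff c cs).mpr hc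
  have hf0 : 0 ≤ PySem.Chars.find cs [c] := (PySem.Chars.find_nonneg_iff cs [c]).mpr hin
  set f := PySem.Chars.find cs [c] with hf
  obtain ⟨hpre, hminf⟩ := PySem.Chars.find_spec hf0
  have hgf : cs[f.toNat]? = some c := (prefix_drop_iff c cs f.toNat).mp hpre
  have hflen : f.toNat < cs.length := (List.getElem?_eq_some_iff.mp hgf).1
  -- c occurs before j, so the first occurrence is before j
  obtain ⟨i, hij, hgi⟩ := getElem?_of_mem_take cs j c hmem
  have hfi : f.toNat ≤ i := by
    by_contra hlt
    exact hminf i (by omega) ((prefix_drop_iff c cs i).mpr hgi)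
  have hfj : f.toNat + 1 ≤ j := by omega
  have hjlen : j < cs.length := (List.getElem?_eq_some_iff.mp hj).1
  have hle : f.toNat + 1 ≤ cs.length := by omega
  have hcast : f + 1 = ((f.toNat + 1 : Nat) : Int) := by omega
  have hpj : [c] <+: cs.drop j := (prefix_drop_iff c cs j).mpr hj
  have hmemd : c ∈ cs.drop (f.toNat + 1) := by
    apply List.mem_of_getElem? (i := j - (f.toNat + 1))
    rw [List.getElem?_drop, show f.toNat + 1 + (j - (f.toNat + 1)) = j by omega]
    exact hj
  have hne : PySem.Chars.findFrom cs [c] ((f.toNat + 1 : Nat) : Int) ≠ -1 := by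
    rw [Ne, PySem.Chars.findFrom_natCast_eq_neg_one_iff cs [c] (f.toNat + 1) hle]
    intro hno
    exact hno ((List.singleton_infix_iff c _).mpr hmemd)
  obtain ⟨hkm, _, hmin⟩ := PySem.Chars.findFrom_natCast_spec cs [c] (f.toNat + 1) hle hne
  set m := PySem.Chars.findFrom cs [c] ((f.toNat + 1 : Nat) : Int) with hmdef
  have hmj : m.toNat ≤ j := by
    by_contra hlt
    exact hmin j hfj (by omega) hpj
  constructor
  · rw [secondOcc, ← hf, hcast, ← hmdef]; exact hne
  · rw [secondOcc, ← hf, hcast, ← hmdef]; omega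

-- B's fold computes the minimum of the valid secondOcc values
theorem charfB_best_cons (c : Char) (rest cs : List Char) (acc : Option Int) :
    charfB_best (c :: rest) cs acc =
      charfB_best rest cs
        (if (secondOcc cs c != -1 &&
            (match acc with | none => true | some b => decide (secondOcc cs c < b)))
         then some (secondOcc cs c) else acc) := rfl

theorem fold_none (cs : List Char) : ∀ (l : List Char) (acc : Option Int),
    charfB_best l cs acc = none ↔ (acc = none ∧ ∀ c ∈ l, secondOcc cs c = -1) := by
  intro l
  induction l with
  | nil => intro acc; simp [charfB_best]
  | cons c rest ih =>
    intro acc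
    rw [charfB_best_cons, ih]
    by_cases hs : secondOcc cs c = -1
    · cases acc <;> simp [hs]
    · cases acc with
      | none => simp [hs]
      | some b =>
        by_cases hlt : secondOcc cs c < b <;> simp [hs, hlt]

theorem fold_some (cs : List Char) : ∀ (l : List Char) (acc : Option Int) (m : Int),
    charfB_best l cs acc = some m →
    ((acc = some m ∨ (∃ c ∈ l, secondOcc cs c = m ∧ m ≠ -1))
      ∧ (∀ b, acc = some b → m ≤ b)
      ∧ (∀ c ∈ l, secondOcc cs c ≠ -1 → m ≤ secondOcc cs c)) := by
  intro l
  induction l with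
  | nil =>
    intro acc m H
    simp [charfB_best] at H
    exact ⟨Or.inl H, fun b hb => by rw [H] at hb; cases hb; rfl,
           fun c hc => absurd hc (List.not_mem_nil)⟩
  | cons c rest ih =>
    intro acc m H
    rw [charfB_best_cons] at H
    by_cases hs : secondOcc cs c = -1
    · -- the head contributes nothing
      simp only [hs] at H
      simp at H
      obtain ⟨h1, h2, h3⟩ := ih acc m H
      refine ⟨?_, h2, ?_⟩
      · rcases h1 with h | ⟨c', hc', hrest⟩
        · exact Or.inl h
        · exact Or.inr ⟨c', List.mem_cons_of_mem c hc', hrest⟩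
      · intro c' hc' hv
        rcases List.mem_cons.mp hc' with rfl | hmem
        · exact absurd hs hv
        · exact h3 c' hmem hv
    · cases acc with
      | none =>
        rw [if_pos (by simp [hs])] at H
        obtain ⟨h1, h2, h3⟩ := ih _ m H
        have hms : m ≤ secondOcc cs c := h2 _ rfl
        refine ⟨?_, fun b hb => absurd hb (by simp), ?_⟩
        · rcases h1 with h | ⟨c', hc', hrest⟩
          · cases h
            exact Or.inr ⟨c, List.mem_cons_self, rfl, hs⟩
          · exact Or.inr ⟨c', List.mem_cons_of_mem c hc', hrest⟩
        · intro c' hc' hv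
          rcases List.mem_cons.mp hc' with rfl | hmem
          · exact hms
          · exact h3 c' hmem hv
      | some b =>
        by_cases hlt : secondOcc cs c < b
        · rw [if_pos (by simp [hs, hlt])] at H
          obtain ⟨h1, h2, h3⟩ := ih _ m H
          have hms : m ≤ secondOcc cs c := h2 _ rfl
          refine ⟨?_, fun b' hb' => ?_, ?_⟩
          · rcases h1 with h | ⟨c', hc', hrest⟩
            · cases h
              exact Or.inr ⟨c, List.mem_cons_self, rfl, hs⟩
            · exact Or.inr ⟨c', List.mem_cons_of_mem c hc', hrest⟩
          · cases hb'
            omega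
          · intro c' hc' hv
            rcases List.mem_cons.mp hc' with rfl | hmem
            · exact hms
            · exact h3 c' hmem hv
        · rw [if_neg (by simp [hlt])] at H
          obtain ⟨h1, h2, h3⟩ := ih _ m H
          have hmb : m ≤ b := h2 _ rfl
          refine ⟨?_, fun b' hb' => by cases hb'; exact hmb, ?_⟩
          · rcases h1 with h | ⟨c', hc', hrest⟩
            · exact Or.inl h
            · exact Or.inr ⟨c', List.mem_cons_of_mem c hc', hrest⟩
          · intro c' hc' hv
            rcases List.mem_cons.mp hc' with rfl | hmem
            · omega
            · exact h3 c' hmem hv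

-- ===== VERDICT (by name: the statement is the Claim_ definition above) =====
theorem charf_spec : Claim_equal_charf := by
  intro s _
  unfold Spec_charf charf charf_alt
  rw [loop_inv s.toList [] PySem.Dict.empty (by simp) rfl]
  cases hbest : charfB_best (PySem.Set.ofList s.toList) s.toList none with
  | none =>
    have hall := ((fold_none s.toList (PySem.Set.ofList s.toList) none).mp hbest).2
    have hnodup : ∀ j, ¬ DupAt s.toList j := by
      rintro j ⟨c, hj, hmem⟩
      have hc : c ∈ s.toList := List.mem_of_getElem? hj
      exact (dup_secondOcc s.toList j c hj hmem).1
        (hall c ((PySem.Set.mem_ofList _ _).mpr hc))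
    have hscan := (scan_spec s.toList [] List.nodup_nil).1 (by simpa using hnodup)
    simpa using hscan
  | some m =>
    obtain ⟨h1, _, h3⟩ := fold_some s.toList (PySem.Set.ofList s.toList) none m hbest
    rcases h1 with h | ⟨c, hcmem, hm, hne⟩
    · exact absurd h (by simp)
    · have hc : c ∈ s.toList := (PySem.Set.mem_ofList _ _).mp hcmem
      obtain ⟨hpos, hdup⟩ := secondOcc_dup s.toList c hc m hm hne
      obtain ⟨c0, hg0, hmem0⟩ := hdup
      have hmin : ∀ i, i < m.toNat → ¬ DupAt s.toList i := by
        rintro i hi ⟨c', hgi, hmemi⟩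
        obtain ⟨hne', hle'⟩ := dup_secondOcc s.toList i c' hgi hmemi
        have hc' : c' ∈ s.toList := List.mem_of_getElem? hgi
        have := h3 c' ((PySem.Set.mem_ofList _ _).mpr hc') hne'
        omega
      have hscan := (scan_spec s.toList [] List.nodup_nil).2
      simp only [List.nil_append, List.length_nil, Nat.zero_add] at hscan
      rw [hscan m.toNat ⟨c0, hg0, hmem0⟩ hmin c0 hg0]
      have hget : PySem.List.pyGet? s.toList m = some c0 := by
        rw [show m = ((m.toNat : Nat) : Int) by omega, PySem.List.pyGet?_natCast]
        exact hg0
      have hslice : PySem.List.slice s.toList none (some m) = s.toList.take m.toNat := by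
        rw [show m = ((m.toNat : Nat) : Int) by omega, PySem.List.slice_to_natCast,
          Int.toNat_natCast]
      simp only [hget, hslice]
      rfl
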